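-- pv_equiv track=rewrite | github.com/AvihayLevi/VideoAnalyticsOpenCV | AnalyzeFrame.py | create_hist_dict
-- ===== SOURCE A (Python) =====
-- def create_hist_dict(result_list):
--     """
--     create a histogram of the results
--     Arguments:
--     results_list - a list of dictionaries containing several
--     ocr results
--     the ocr
--     Returns:
--     hist_dict - a dictionary of dictionaries. every
--     key(field) has a dictionary, and the field's
--     dictionary's keys are the possible results. it's values
--     are the number of times they appeard in the
--     results_list.
--     """
--     hist_dict = {}
--     for res in result_list:
--         for (key, val) in res.items():
--             if key in hist_dict.keys():
--                 if val in hist_dict[key].keys():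
--                     hist_dict[key][val] += 1
--                 else:
--                     hist_dict[key][val] = 1
--             else:
--                 new_dict = {}
--                 new_dict[val] = 1
--                 hist_dict[key] = new_dict
--     return(hist_dict)
-- ===== SOURCE B (Python) =====
-- def create_hist_dict(result_list):
--     # Pass 1: group all observed values by field, keeping insertion order.
--     groups = {}
--     for res in result_list:
--         for key, val in res.items():
--             groups.setdefault(key, []).append(val)
--     # Pass 2: turn each group's value list into a first-occurrence-ordered count dict.
--     return {key: {v: vals.count(v) for v in vals} for key, vals in groups.items()}
-- ===== Notes on version B (the rewrite author's own statement) =====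
-- stated objective: alternative
-- what changed: Replaces A's one-pass nested first-seen-branch count updates with a two-pass group-then-count scheme: first group values per field into lists, then build each field's histogram with a dict comprehension over the group using list.count.
import Mathlib
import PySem

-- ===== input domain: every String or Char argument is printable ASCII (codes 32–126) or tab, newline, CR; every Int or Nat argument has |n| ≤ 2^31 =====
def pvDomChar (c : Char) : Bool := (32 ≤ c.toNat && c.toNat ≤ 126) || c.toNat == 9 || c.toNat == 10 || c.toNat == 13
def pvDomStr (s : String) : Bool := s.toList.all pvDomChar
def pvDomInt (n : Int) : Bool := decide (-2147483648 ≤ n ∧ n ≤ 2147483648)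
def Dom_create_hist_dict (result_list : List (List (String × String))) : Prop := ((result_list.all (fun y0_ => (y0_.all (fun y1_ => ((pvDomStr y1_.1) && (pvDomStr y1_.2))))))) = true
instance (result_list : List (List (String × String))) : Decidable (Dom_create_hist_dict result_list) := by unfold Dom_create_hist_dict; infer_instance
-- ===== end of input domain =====

-- B replaces A's one-pass nested first-seen-branch count updates by a two-pass
-- group-then-count decomposition (objective: alternative, same exact result).

-- ===== PORT A =====
-- one (key, val) update of A's hist_dict, with A's explicit first-seen branches
def histStepA (h : PySem.Dict String (PySem.Dict String Int)) (kv : String × String) :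
    PySem.Dict String (PySem.Dict String Int) :=
  if h.contains kv.1 then
    let inner := h.getD kv.1 PySem.Dict.empty
    if inner.contains kv.2 then
      h.insert kv.1 (inner.insert kv.2 (inner.getD kv.2 0 + 1))
    else
      h.insert kv.1 (inner.insert kv.2 1)
  else
    h.insert kv.1 (PySem.Dict.empty.insert kv.2 1)

def create_hist_dict (result_list : List (List (String × String))) : List (String × List (String × Int)) :=
  ((result_list.foldl (fun h res => res.foldl histStepA h) PySem.Dict.empty).items).map
    (fun p => (p.1, p.2.items))

-- ===== PORT B =====
-- pass 1 step: groups.setdefault(key, []).append(val)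
def groupStep (g : PySem.Dict String (List String)) (kv : String × String) :
    PySem.Dict String (List String) :=
  g.modify kv.1 [] (fun l => l ++ [kv.2])

-- pass 2 inner comprehension: {v: vals.count(v) for v in vals}
def countVals (vals : List String) : PySem.Dict String Int :=
  vals.foldl (fun d v => d.insert v ((vals.count v : Int))) PySem.Dict.empty

def create_hist_dict_alt (result_list : List (List (String × String))) : List (String × List (String × Int)) :=
  let groups := result_list.foldl (fun g res => res.foldl groupStep g) PySem.Dict.empty
  ((groups.items.foldl (fun out p => out.insert p.1 (countVals p.2)) PySem.Dict.empty).items).map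
    (fun p => (p.1, p.2.items))

-- ===== PRECONDITION & SPEC =====
def Spec_create_hist_dict (result_list : List (List (String × String))) (out : List (String × List (String × Int))) : Prop := out = create_hist_dict_alt result_list
instance (result_list : List (List (String × String))) (out : List (String × List (String × Int))) : Decidable (Spec_create_hist_dict result_list out) := by unfold Spec_create_hist_dict; infer_instance

-- ===== CLAIM (what is proved, stated in full; the proofs are below) =====
def Claim_equal_create_hist_dict : Prop := ∀ (result_list : List (List (String × String))), Dom_create_hist_dict result_list → Spec_create_hist_dict result_list (create_hist_dict result_list)

-- ===== LEMMAS AND PROOFS =====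

lemma any_beq_decide (S : List String) (x : String) : (S.any fun y => y == x) = decide (x ∈ S) := by
  induction S with
  | nil => rfl
  | cons a t ih =>
      by_cases h : a = x
      · simp [List.any_cons, h]
      · simp [List.any_cons, ih, h, Ne.symm h]

lemma mk_contains_map {ν : Type} (f : String → ν) (S : List String) (x : String) :
    (PySem.Dict.mk (S.map (fun w => (w, f w)))).contains x = decide (x ∈ S) := by
  rw [PySem.Dict.contains_mk, List.any_map]
  simpa [Function.comp_def] using any_beq_decide S x

lemma insert_val_of_key (f : String → Int) (S : List String) (x : String) :
    (PySem.Dict.mk (S.map (fun w => (w, f w)))).insert x (f x)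
      = ⟨(PySem.Set.add S x).map (fun w => (w, f w))⟩ := by
  by_cases hx : x ∈ S
  · have hs : PySem.Set.contains S x = true := by simp [PySem.Set.contains, hx]
    simp only [PySem.Dict.insert, mk_contains_map, hx, decide_true, if_pos, PySem.Set.add, hs,
      List.map_map]
    refine congrArg PySem.Dict.mk ?_
    apply List.map_congr_left
    intro w hw
    by_cases h : w = x <;> simp [h]
  · have hs : ¬ PySem.Set.contains S x = true := by simp [PySem.Set.contains, hx]
    simp only [PySem.Dict.insert, mk_contains_map, hx, decide_false, if_neg, PySem.Set.add, hs,
      Bool.false_eq_true, not_false_iff, List.map_append, List.map_cons, List.map_nil]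

lemma foldl_insert_val (f : String → Int) (l : List String) (S : List String) :
    l.foldl (fun d v => d.insert v (f v)) (⟨S.map (fun w => (w, f w))⟩ : PySem.Dict String Int)
      = ⟨(PySem.Set.update S l).map (fun w => (w, f w))⟩ := by
  induction l generalizing S with
  | nil => rfl
  | cons a t ih =>
      rw [List.foldl_cons, insert_val_of_key]
      exact ih (PySem.Set.add S a)


lemma countVals_eq (vs : List String) :
    countVals vs = ⟨(PySem.Set.ofList vs).map (fun w => (w, (PySem.List.count vs w : Int)))⟩ := by
  have := foldl_insert_val (fun w => (PySem.List.count vs w : Int)) vs []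
  simpa [countVals, PySem.Set.update, PySem.Set.ofList, PySem.Set.empty, PySem.Dict.empty] using this

lemma countVals_keys (vs : List String) : (countVals vs).keys = PySem.Set.ofList vs := by
  rw [countVals_eq]
  simp [PySem.Dict.keys, Function.comp_def]

lemma countVals_contains (vs : List String) (v : String) :
    (countVals vs).contains v = decide (v ∈ vs) := by
  rw [countVals_eq, mk_contains_map]
  simp [PySem.Set.mem_ofList]

lemma countVals_getD (vs : List String) (v : String) :
    (countVals vs).getD v 0 = (PySem.List.count vs v : Int) := by
  by_cases hv : v ∈ vs
  · have hmem : (v, (PySem.List.count vs v : Int)) ∈ (countVals vs).items := by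
      rw [countVals_eq]
      exact List.mem_map.mpr ⟨v, (PySem.Set.mem_ofList vs v).mpr hv, rfl⟩
    have hnd : (countVals vs).keys.Nodup := by
      rw [countVals_keys]; exact PySem.Set.nodup_ofList vs
    exact PySem.Dict.getD_of_mem_items _ hmem hnd 0
  · have hc : (countVals vs).contains v = false := by
      rw [countVals_contains]; simp [hv]
    rw [PySem.Dict.getD_of_not_contains _ _ hc]
    simp [PySem.List.count, List.count_eq_zero.mpr (by simpa using hv)]

lemma ofList_snoc_mem (vs : List String) (v : String) (hv : v ∈ vs) :
    PySem.Set.ofList (vs ++ [v]) = PySem.Set.ofList vs := by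
  rw [PySem.Set.ofList_append]
  exact PySem.Set.add_of_mem ((PySem.Set.mem_ofList vs v).mpr hv)

lemma ofList_snoc_not_mem (vs : List String) (v : String) (hv : v ∉ vs) :
    PySem.Set.ofList (vs ++ [v]) = PySem.Set.ofList vs ++ [v] := by
  rw [PySem.Set.ofList_append]
  exact PySem.Set.add_of_not_mem (fun h => hv ((PySem.Set.mem_ofList vs v).mp h))

lemma countVals_snoc (vs : List String) (v : String) :
    countVals (vs ++ [v]) = (countVals vs).insert v ((PySem.List.count vs v : Int) + 1) := by
  rw [countVals_eq, countVals_eq]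
  by_cases hv : v ∈ vs
  · have hc : (PySem.Dict.mk ((PySem.Set.ofList vs).map (fun w => (w, (PySem.List.count vs w : Int))))).contains v = true := by
      rw [mk_contains_map]; simp [PySem.Set.mem_ofList, hv]
    rw [PySem.Dict.insert, if_pos hc, ofList_snoc_mem vs v hv]
    refine congrArg PySem.Dict.mk ?_
    rw [List.map_map]
    apply List.map_congr_left
    intro w hw
    by_cases h : w = v
    · simp [h]
    · simp [h, List.count_eq_zero]
  · have hc : (PySem.Dict.mk ((PySem.Set.ofList vs).map (fun w => (w, (PySem.List.count vs w : Int))))).contains v = false := by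
      rw [mk_contains_map]
      simp [PySem.Set.mem_ofList, hv]
    rw [PySem.Dict.insert, if_neg (by simp only [hc]; exact Bool.false_ne_true), ofList_snoc_not_mem vs v hv]
    refine congrArg PySem.Dict.mk ?_
    rw [List.map_append]
    refine congrArg₂ _ ?_ ?_
    · apply List.map_congr_left
      intro w hw
      have hwv : w ≠ v := by
        intro h; subst h
        exact hv ((PySem.Set.mem_ofList vs w).mp hw)
      simp [hwv, List.count_eq_zero]
    · simp [List.count_eq_zero.mpr (by simpa using hv)]



def mapCV (g : PySem.Dict String (List String)) : PySem.Dict String (PySem.Dict String Int) :=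
  ⟨g.items.map (fun p => (p.1, countVals p.2))⟩

lemma mapCV_contains (g : PySem.Dict String (List String)) (k : String) :
    (mapCV g).contains k = g.contains k := by
  simp [mapCV, PySem.Dict.contains, List.any_map, Function.comp_def]

lemma mapCV_get? (g : PySem.Dict String (List String)) (k : String) :
    (mapCV g).get? k = (g.get? k).map countVals := by
  simp [mapCV, PySem.Dict.get?, List.find?_map, Function.comp_def, Option.map_map]

lemma mapCV_insert (g : PySem.Dict String (List String)) (k : String) (vs : List String) :
    mapCV (g.insert k vs) = (mapCV g).insert k (countVals vs) := by
  by_cases hc : g.contains k = true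
  · have hc2 : (mapCV g).contains k = true := by rw [mapCV_contains]; exact hc
    rw [mapCV, PySem.Dict.insert, PySem.Dict.insert, if_pos hc, if_pos hc2]
    simp only [mapCV, List.map_map]
    refine congrArg PySem.Dict.mk ?_
    apply List.map_congr_left
    intro p hp
    by_cases h : p.1 = k <;> simp [h]
  · have hc2 : ¬ (mapCV g).contains k = true := by rw [mapCV_contains]; exact hc
    rw [mapCV, PySem.Dict.insert, PySem.Dict.insert, if_neg hc, if_neg hc2]
    simp [mapCV]

lemma countVals_single (v : String) :
    countVals [v] = PySem.Dict.empty.insert v 1 := by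
  show PySem.Dict.empty.insert v ((PySem.List.count [v] v : Int)) = PySem.Dict.empty.insert v 1
  simp [PySem.List.count]

lemma step_commute (g : PySem.Dict String (List String)) (kv : String × String) :
    histStepA (mapCV g) kv = mapCV (groupStep g kv) := by
  obtain ⟨k, v⟩ := kv
  have hmod : groupStep g (k, v) = g.insert k (g.getD k [] ++ [v]) := rfl
  by_cases hc : g.contains k = true
  · have hc2 : (mapCV g).contains k = true := by rw [mapCV_contains]; exact hc
    obtain ⟨vs, hvs⟩ : ∃ vs, g.get? k = some vs := by
      rw [PySem.Dict.contains_eq_isSome_get?] at hc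
      exact Option.isSome_iff_exists.mp hc
    have hgd : g.getD k [] = vs := by rw [PySem.Dict.getD_eq_get?_getD, hvs]; rfl
    have hinner : (mapCV g).getD k PySem.Dict.empty = countVals vs := by
      rw [PySem.Dict.getD_eq_get?_getD, mapCV_get?, hvs]; rfl
    rw [hmod, hgd, mapCV_insert, countVals_snoc]
    simp only [histStepA, hc2, if_pos, hinner, countVals_contains, countVals_getD]
    by_cases hv : v ∈ vs
    · simp [hv]
    · have h0 : List.count v vs = 0 := List.count_eq_zero.mpr (by simpa using hv)
      simp [hv, PySem.List.count, h0]
  · have hc2 : (mapCV g).contains k = false := by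
      rw [mapCV_contains]; simpa using hc
    have hgd : g.getD k [] = [] :=
      PySem.Dict.getD_of_not_contains _ _ (by simpa using hc)
    rw [hmod, hgd, mapCV_insert]
    simp [histStepA, hc2, List.nil_append, countVals_single]

lemma final_pass (groups : PySem.Dict String (List String)) (hnd : groups.keys.Nodup) :
    groups.items.foldl (fun out p => out.insert p.1 (countVals p.2)) PySem.Dict.empty
      = mapCV groups := by
  apply PySem.Dict.ext
  rw [PySem.Dict.items_foldl_insert_fresh groups.items Prod.fst (fun p => countVals p.2)
      PySem.Dict.empty (fun a _ => PySem.Dict.contains_empty _) (by exact hnd)]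
  rfl

lemma groups_nodup (result_list : List (List (String × String))) :
    (result_list.foldl (fun g res => res.foldl groupStep g) PySem.Dict.empty).keys.Nodup := by
  rw [← List.foldl_flatten]
  exact PySem.Dict.nodup_keys_foldl_modify_key result_list.flatten Prod.fst []
    (fun _ kv l => l ++ [kv.2]) PySem.Dict.empty PySem.Dict.nodup_keys_empty

lemma fold_commute (pairs : List (String × String)) (g : PySem.Dict String (List String)) :
    pairs.foldl histStepA (mapCV g) = mapCV (pairs.foldl groupStep g) := by
  induction pairs generalizing g with
  | nil => rfl
  | cons kv rest ih => simp only [List.foldl_cons, step_commute]; exact ih _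

-- ===== VERDICT (by name: the statement is the Claim_ definition above) =====
theorem create_hist_dict_spec : Claim_equal_create_hist_dict := by
  intro rl _
  unfold Spec_create_hist_dict create_hist_dict create_hist_dict_alt
  dsimp only
  rw [final_pass _ (groups_nodup rl)]
  have hA : rl.foldl (fun h res => res.foldl histStepA h) PySem.Dict.empty
      = mapCV (rl.foldl (fun g res => res.foldl groupStep g) PySem.Dict.empty) := by
    rw [← List.foldl_flatten, ← List.foldl_flatten]
    have : (PySem.Dict.empty : PySem.Dict String (PySem.Dict String Int)) = mapCV PySem.Dict.empty := rfl
    rw [this, fold_commute]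
  rw [hA]
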